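-- pv_equiv track=rewrite | github.com/Kairs0/Symbolic-Execution-Tool | symbolic_exec_tools.py | path_to_node
-- ===== SOURCE A (Python) =====
-- def path_to_node(node_key, graph):
--     path_result = [node_key]
--     current_node = node_key
--
--     previous_nodes = get_father_for_node(current_node, graph)
--     while previous_nodes:
--         choice_to_get_up = [node for node in previous_nodes if node not in path_result][0]
--         path_result.append(choice_to_get_up)
--         previous_nodes = get_father_for_node(choice_to_get_up, graph)
--
--     return path_result
--
-- def get_father_for_node(node_key, graph):
--     """
--     Returns list of nodes that precede given node
--     :param node_key:
--     :param graph: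
--     :return:
--     """
--     result = []
--     for key, value in graph.items():
--         if node_key in value[-1]:
--             result.append(key)
--
--     return result
-- ===== SOURCE B (Python) =====
-- def path_to_node(node_key, graph):
--     # One pass over the graph builds a child -> first-parent successor map
--     # (the first dict key whose block's last statement list contains the child),
--     # then the path is a plain climb of that map, guarded against revisits.
--     first_parent = {}
--     for key, value in graph.items():
--         for child in value[-1]:
--             first_parent.setdefault(child, key)
--
--     path = [node_key]
--     seen = {node_key}
--     current = node_key
--     while current in first_parent and first_parent[current] not in seen:
--         current = first_parent[current]
--         path.append(current)
--         seen.add(current)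
--     return path
-- ===== Notes on version B (the rewrite author's own statement) =====
-- stated objective: alternative
-- what changed: B replaces A's per-step rescan of the whole graph and its not-yet-on-path filter by a single pass that records each child's first parent in a successor map, then climbs that map with a visited-set guard; A rescans all entries at every step of the walk.
-- outside the precondition, e.g. on path_to_node(0, {1: [[0]], 0: [[1]], 3: [[1]]}): A returns [0, 1, 3], B returns [0, 1]
import Mathlib
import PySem

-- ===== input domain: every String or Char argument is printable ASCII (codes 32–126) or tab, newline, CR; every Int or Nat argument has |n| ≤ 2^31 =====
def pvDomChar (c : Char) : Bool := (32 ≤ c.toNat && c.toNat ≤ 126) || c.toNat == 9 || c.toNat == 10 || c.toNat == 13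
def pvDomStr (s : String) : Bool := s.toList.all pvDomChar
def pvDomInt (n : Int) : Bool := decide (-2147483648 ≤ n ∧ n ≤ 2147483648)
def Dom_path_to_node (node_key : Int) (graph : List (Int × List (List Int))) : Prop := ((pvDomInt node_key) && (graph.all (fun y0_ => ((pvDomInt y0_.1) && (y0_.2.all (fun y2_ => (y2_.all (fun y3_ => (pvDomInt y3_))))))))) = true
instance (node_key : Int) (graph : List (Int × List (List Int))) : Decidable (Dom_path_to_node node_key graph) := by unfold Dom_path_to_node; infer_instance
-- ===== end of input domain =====

-- B builds a child->first-parent successor map in one pass and climbs it with a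
-- visited-set guard, instead of A's rescan of the whole graph and not-on-path
-- filter at every step (objective: alternative).


-- ===== PORT A =====
-- get_father_for_node: scan every (key, value), collect keys whose value[-1] contains node_key.
-- value[-1] on an empty value raises IndexError in Python; Pre_ excludes that, the total form uses default [].
def pvGetFather (node_key : Int) (graph : List (Int × List (List Int))) : List Int :=
  graph.foldl (fun result kv =>
    if (PySem.List.pyGetD kv.2 (-1) []).contains node_key then result ++ [kv.1] else result) []

-- the while loop; each iteration appends a graph key not yet in the path, so graph.length + 1 fuel
-- is never exhausted.  When previous_nodes is nonempty but every element is already in the path,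
-- Python raises IndexError; Pre_ excludes that, the port returns the path built so far.
def pvLoopA (graph : List (Int × List (List Int))) : Nat → List Int → List Int → List Int
  | 0, path, _ => path
  | fuel+1, path, prev =>
    if prev.isEmpty then path
    else
      match (prev.filter (fun n => !path.contains n)).head? with
      | none => path
      | some c => pvLoopA graph fuel (path ++ [c]) (pvGetFather c graph)

def path_to_node (node_key : Int) (graph : List (Int × List (List Int))) : List Int :=
  pvLoopA graph (graph.length + 1) [node_key] (pvGetFather node_key graph)

-- ===== PORT B =====
-- first_parent.setdefault(child, key) over every child of every entry, one pass.
def pvFirstParent (graph : List (Int × List (List Int))) : PySem.Dict Int Int :=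
  graph.foldl (fun d kv =>
    (PySem.List.pyGetD kv.2 (-1) []).foldl (fun d' c => d'.setdefault c kv.1) d)
    PySem.Dict.empty

-- the while loop of B: climb the successor map until the key is absent or the parent was
-- already visited.  Each iteration adds a fresh graph key to `seen`, so graph.length + 1
-- fuel is never exhausted.
def pvClimbB (fp : PySem.Dict Int Int) : Nat → List Int → PySem.Set Int → Int → List Int
  | 0, path, _, _ => path
  | fuel+1, path, seen, current =>
    match fp.get? current with
    | none => path
    | some p =>
      if PySem.Set.contains seen p then path
      else pvClimbB fp fuel (path ++ [p]) (PySem.Set.add seen p) p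

def path_to_node_alt (node_key : Int) (graph : List (Int × List (List Int))) : List Int :=
  let fp := pvFirstParent graph
  pvClimbB fp (graph.length + 1) [node_key] (PySem.Set.ofList [node_key]) node_key

-- ===== PRECONDITION & SPEC =====
-- helpers for Pre_: the parent edges of the graph and a fuel-bounded reachable set
def pvEdges (graph : List (Int × List (List Int))) : List (Int × Int) :=
  graph.flatMap (fun kv => (PySem.List.pyGetD kv.2 (-1) []).map (fun c => (kv.1, c)))

def pvReach (edges : List (Int × Int)) : Nat → List Int → List Int
  | 0, s => s
  | n+1, s => pvReach edges n (PySem.Set.ofList (s ++ (edges.filter (fun e => s.contains e.1)).map (fun e => e.2)))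

-- the ancestors of a node: upward reachability along reversed parent edges
def pvAnc (node_key : Int) (graph : List (Int × List (List Int))) : List Int :=
  pvReach ((pvEdges graph).map (fun e => (e.2, e.1))) (pvEdges graph).length [node_key]

-- Pre_ excludes a graph entry with an empty value list (value[-1] raises IndexError in A),
-- a duplicate key (not a Python dict), and a directed cycle among the ancestors of node_key:
-- on such cycles A either raises IndexError or escapes through its not-in-path filter, an
-- order-dependent accident, while B's climb stops at the first revisit.
def Pre_path_to_node (node_key : Int) (graph : List (Int × List (List Int))) : Prop :=
  (∀ kv ∈ graph, kv.2 ≠ []) ∧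
  (graph.map (fun kv => kv.1)).Nodup ∧
  (∀ k ∈ pvAnc node_key graph, ¬ (pvReach (pvEdges graph) (pvEdges graph).length
      (((pvEdges graph).filter (fun e => e.1 == k)).map (fun e => e.2))).contains k = true)

instance (node_key : Int) (graph : List (Int × List (List Int))) : Decidable (Pre_path_to_node node_key graph) := by unfold Pre_path_to_node; infer_instance

def pvWitness_path_to_node : Int × (List (Int × List (List Int))) := (0, [(1, [[0]]), (2, [[1]])])

def Spec_path_to_node (node_key : Int) (graph : List (Int × List (List Int))) (out : List Int) : Prop := out = path_to_node_alt node_key graph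
instance (node_key : Int) (graph : List (Int × List (List Int))) (out : List Int) : Decidable (Spec_path_to_node node_key graph out) := by unfold Spec_path_to_node; infer_instance

-- ===== CLAIM (what is proved, stated in full; the proofs are below) =====
def Claim_equal_path_to_node : Prop := ∀ (node_key : Int) (graph : List (Int × List (List Int))), Dom_path_to_node node_key graph → Pre_path_to_node node_key graph → Spec_path_to_node node_key graph (path_to_node node_key graph)

-- ===== LEMMAS AND PROOFS =====

-- the accumulator of pvGetFather's fold just appends
theorem pvGetFather_acc (node_key : Int) (graph : List (Int × List (List Int))) (acc : List Int) :
    graph.foldl (fun result kv =>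
      if (PySem.List.pyGetD kv.2 (-1) []).contains node_key then result ++ [kv.1] else result) acc
    = acc ++ pvGetFather node_key graph := by
  induction graph generalizing acc with
  | nil => simp [pvGetFather]
  | cons kv gs ih =>
    simp only [pvGetFather, List.foldl_cons]
    by_cases h : (PySem.List.pyGetD kv.2 (-1) []).contains node_key = true
    · rw [if_pos h, if_pos h, ih, ih ([] ++ [kv.1])]
      simp
    · rw [if_neg h, if_neg h, ih, ih ([] : List Int)]
      simp

theorem pvGetFather_cons (node_key : Int) (kv : Int × List (List Int)) (gs : List (Int × List (List Int))) :
    pvGetFather node_key (kv :: gs)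
    = (if (PySem.List.pyGetD kv.2 (-1) []).contains node_key then [kv.1] else [])
      ++ pvGetFather node_key gs := by
  simp only [pvGetFather, List.foldl_cons]
  by_cases h : (PySem.List.pyGetD kv.2 (-1) []).contains node_key = true
  · rw [if_pos h, if_pos h]; exact pvGetFather_acc node_key gs [kv.1]
  · rw [if_neg h, if_neg h]; simp [pvGetFather_acc node_key gs []]

-- membership in get_father = the parent edge relation
-- get_father as a filter-map, and membership = the parent edge relation
theorem getFather_eq_filterMap (c : Int) (graph : List (Int × List (List Int))) :
    pvGetFather c graph
    = (graph.filter (fun kv => (PySem.List.pyGetD kv.2 (-1) []).contains c)).map (fun kv => kv.1) := by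
  induction graph with
  | nil => simp [pvGetFather]
  | cons kv gs ih =>
    rw [pvGetFather_cons, ih, List.filter_cons]
    by_cases h : c ∈ PySem.List.pyGetD kv.2 (-1) []
    · simp [h]
    · simp [h]

theorem mem_getFather (p c : Int) (graph : List (Int × List (List Int))) :
    p ∈ pvGetFather c graph ↔ (p, c) ∈ pvEdges graph := by
  rw [getFather_eq_filterMap]
  simp only [pvEdges, List.mem_map, List.mem_filter, List.mem_flatMap]
  constructor
  · rintro ⟨kv, ⟨hkv, hc⟩, rfl⟩
    exact ⟨kv, hkv, c, by simpa using hc, rfl⟩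
  · rintro ⟨kv, hkv, x, hx, hxe⟩
    obtain ⟨rfl, rfl⟩ : kv.1 = p ∧ x = c := by
      constructor <;> [exact congrArg Prod.fst hxe; exact congrArg Prod.snd hxe]
    exact ⟨kv, ⟨hkv, by simpa using hx⟩, rfl⟩

-- the successor map holds each child's FIRST father
theorem firstParent_inner (L : List Int) (k : Int) (d : PySem.Dict Int Int) (x : Int) :
    (L.foldl (fun d' c => d'.setdefault c k) d).get? x
    = if (d.get? x).isSome then d.get? x else (if x ∈ L then some k else none) := by
  induction L generalizing d with
  | nil => simp
  | cons a L ih =>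
    simp only [List.foldl_cons]
    rw [ih]
    by_cases hx : x = a
    · subst hx
      rw [PySem.Dict.get?_setdefault_self]
      cases h : d.get? x <;> simp [h]
    · rw [PySem.Dict.get?_setdefault_of_ne d k hx]
      by_cases h : (d.get? x).isSome
      · simp [h]
      · simp [h, List.mem_cons, hx]

theorem firstParent_acc (graph : List (Int × List (List Int))) (d : PySem.Dict Int Int) (x : Int) :
    (graph.foldl (fun d kv =>
        (PySem.List.pyGetD kv.2 (-1) []).foldl (fun d' c => d'.setdefault c kv.1) d) d).get? x
    = if (d.get? x).isSome then d.get? x else (pvGetFather x graph).head? := by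
  induction graph generalizing d with
  | nil => simp [pvGetFather]
  | cons kv gs ih =>
    simp only [List.foldl_cons]
    rw [ih, firstParent_inner, pvGetFather_cons]
    by_cases h : (d.get? x).isSome
    · simp [h]
    · simp only [h, if_false]
      by_cases hm : x ∈ PySem.List.pyGetD kv.2 (-1) []
      · have hc : (PySem.List.pyGetD kv.2 (-1) []).contains x = true := by simpa using hm
        simp [hm, hc]
      · have hc : ¬ (PySem.List.pyGetD kv.2 (-1) []).contains x = true := by simpa using hm
        simp [hm, hc]

theorem firstParent_get? (graph : List (Int × List (List Int))) (x : Int) :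
    (pvFirstParent graph).get? x = (pvGetFather x graph).head? := by
  have := firstParent_acc graph PySem.Dict.empty x
  simpa [pvFirstParent] using this

-- reachability lemmas for pvReach
theorem mem_pvReach_of_mem (E : List (Int × Int)) (n : Nat) (s : List Int) (x : Int)
    (h : x ∈ s) : x ∈ pvReach E n s := by
  induction n generalizing s with
  | zero => simpa [pvReach] using h
  | succ m ih =>
    simp only [pvReach]
    exact ih _ (by rw [PySem.Set.mem_ofList]; exact List.mem_append.mpr (Or.inl h))

theorem pvReach_of_chain (E : List (Int × Int)) :
    ∀ (rest : List Int) (h0 : Int) (n : Nat) (s : List Int),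
      List.IsChain (fun a b => (a, b) ∈ E) (h0 :: rest) → h0 ∈ s → rest.length ≤ n →
      ∀ k, (h0 :: rest).getLast? = some k → k ∈ pvReach E n s := by
  intro rest
  induction rest with
  | nil =>
    intro h0 n s _ hs _ k hk
    simp only [List.getLast?_singleton, Option.some.injEq] at hk
    subst hk
    exact mem_pvReach_of_mem E n s _ hs
  | cons h1 rest ih =>
    intro h0 n s hch hs hlen k hk
    obtain ⟨m, rfl⟩ : ∃ m, n = m + 1 := by
      cases n with
      | zero => simp at hlen
      | succ m => exact ⟨m, rfl⟩
    have hedge : (h0, h1) ∈ E := (List.isChain_cons_cons.mp hch).1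
    have hch' : List.IsChain (fun a b => (a, b) ∈ E) (h1 :: rest) :=
      (List.isChain_cons_cons.mp hch).2
    simp only [pvReach]
    refine ih h1 m _ hch' ?_ (by simpa using hlen) k (by simpa using hk)
    rw [PySem.Set.mem_ofList]
    refine List.mem_append.mpr (Or.inr ?_)
    refine List.mem_map.mpr ⟨(h0, h1), List.mem_filter.mpr ⟨hedge, by simpa using hs⟩, rfl⟩

-- a Nodup list included in another is no longer
theorem nodup_subset_length (l l' : List Int) (h : l.Nodup) (hsub : ∀ x ∈ l, x ∈ l') :
    l.length ≤ l'.length := by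
  have h1 : l.toFinset.card = l.length := List.toFinset_card_of_nodup h
  have h2 : l.toFinset ⊆ l'.toFinset := by
    intro x hx
    rw [List.mem_toFinset] at hx ⊢
    exact hsub x hx
  calc l.length = l.toFinset.card := h1.symm
    _ ≤ l'.toFinset.card := Finset.card_le_card h2
    _ ≤ l'.length := List.toFinset_card_le l'

-- every non-head element of a chain is an edge target
theorem chain_tail_mem (E : List (Int × Int)) :
    ∀ (l : List Int), List.IsChain (fun a b => (a, b) ∈ E) l →
      ∀ b ∈ l.tail, b ∈ E.map Prod.snd := by
  intro l
  induction l with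
  | nil => simp
  | cons a l ih =>
    intro hch b hb
    cases l with
    | nil => simp at hb
    | cons c l =>
      obtain ⟨hac, hch'⟩ := List.isChain_cons_cons.mp hch
      simp only [List.tail_cons] at hb
      rcases List.mem_cons.mp hb with rfl | hb
      · exact List.mem_map.mpr ⟨(a, b), hac, rfl⟩
      · exact ih hch' b (by simpa using hb)

-- a Nodup chain has at most |E| edges
theorem chain_len_le (E : List (Int × Int)) (l : List Int)
    (hch : List.IsChain (fun a b => (a, b) ∈ E) l) (hnd : l.Nodup) :
    l.tail.length ≤ E.length := by
  have := nodup_subset_length l.tail (E.map Prod.snd) (hnd.sublist (List.tail_sublist l))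
    (fun b hb => chain_tail_mem E l hch b hb)
  simpa using this

-- KEY: under Pre_'s acyclicity the first father of the current node is never on the path
theorem no_revisit (node_key : Int) (graph : List (Int × List (List Int)))
    (hPre3 : ∀ k ∈ pvAnc node_key graph, ¬ (pvReach (pvEdges graph) (pvEdges graph).length
      (((pvEdges graph).filter (fun e => e.1 == k)).map (fun e => e.2))).contains k = true)
    (path : List Int) (c p : Int)
    (hch : List.IsChain (fun a b => (b, a) ∈ pvEdges graph) path)
    (hnd : path.Nodup) (hhd : path.head? = some node_key) (hlast : path.getLast? = some c)
    (hpc : (p, c) ∈ pvEdges graph) : p ∉ path := by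
  intro hmem
  obtain ⟨l1, l2, rfl⟩ := List.append_of_mem hmem
  -- (a) p is an ancestor of node_key
  have hpref : (l1 ++ [p]) <+: (l1 ++ p :: l2) := ⟨l2, by simp⟩
  have hchPref : List.IsChain (fun a b => (b, a) ∈ pvEdges graph) (l1 ++ [p]) :=
    hch.prefix hpref
  have hchPrefR : List.IsChain
      (fun a b => (a, b) ∈ (pvEdges graph).map (fun e => (e.2, e.1))) (l1 ++ [p]) := by
    refine hchPref.imp ?_
    intro a b hab
    exact List.mem_map.mpr ⟨(b, a), hab, rfl⟩
  have hheadPref : (l1 ++ [p]).head? = some node_key := by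
    rw [List.head?_append]
    rwa [List.head?_append] at hhd
  have hndPref : (l1 ++ [p]).Nodup := hnd.sublist hpref.sublist
  have hpAnc : p ∈ pvAnc node_key graph := by
    unfold pvAnc
    rcases hh : l1 ++ [p] with _ | ⟨h0, rest⟩
    · simp at hh
    · have hh0 : h0 = node_key := by
        rw [hh] at hheadPref; simpa using hheadPref
      have hlenR : rest.length ≤ ((pvEdges graph).map (fun e => (e.2, e.1))).length := by
        have := chain_len_le _ _ (hh ▸ hchPrefR) (hh ▸ hndPref)
        simpa using this
      refine pvReach_of_chain _ rest h0 _ [node_key] (hh ▸ hchPrefR)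
        (by simp [hh0]) (by simpa using hlenR) p ?_
      rw [← hh, List.getLast?_concat]
  -- (b) p lies on a downward cycle through its child c
  have hsuf : (p :: l2) <:+ (l1 ++ p :: l2) := ⟨l1, rfl⟩
  have hchSuf : List.IsChain (fun a b => (b, a) ∈ pvEdges graph) (p :: l2) := hch.suffix hsuf
  have hlastSuf : (p :: l2).getLast? = some c := by
    rw [List.getLast?_append] at hlast
    cases hl2 : (p :: l2).getLast? with
    | none => simp at hl2
    | some x => rw [hl2] at hlast; simpa using hlast
  have hchRev : List.IsChain (fun a b => (a, b) ∈ pvEdges graph) (p :: l2).reverse := by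
    rw [List.isChain_reverse]
    exact hchSuf
  have hndRev : (p :: l2).reverse.Nodup := List.nodup_reverse.mpr (hnd.sublist hsuf.sublist)
  have hreach : p ∈ pvReach (pvEdges graph) (pvEdges graph).length
      (((pvEdges graph).filter (fun e => e.1 == p)).map (fun e => e.2)) := by
    rcases hh : (p :: l2).reverse with _ | ⟨h0, rest⟩
    · simp at hh
    · have hh0 : h0 = c := by
        have := List.head?_reverse (l := p :: l2)
        rw [hh, hlastSuf] at this; simpa using this
      have hlenR : rest.length ≤ (pvEdges graph).length := by
        have := chain_len_le _ _ (hh ▸ hchRev) (hh ▸ hndRev)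
        simpa using this
      refine pvReach_of_chain _ rest h0 _ _ (hh ▸ hchRev) ?_ hlenR p ?_
      · rw [hh0]
        exact List.mem_map.mpr ⟨(p, c), List.mem_filter.mpr ⟨hpc, by simp⟩, rfl⟩
      · rw [← hh, List.getLast?_reverse]; rfl
  exact hPre3 p hpAnc (by simpa using hreach)

-- the two walks coincide step for step under the invariant
theorem loop_eq (node_key : Int) (graph : List (Int × List (List Int)))
    (hPre3 : ∀ k ∈ pvAnc node_key graph, ¬ (pvReach (pvEdges graph) (pvEdges graph).length
      (((pvEdges graph).filter (fun e => e.1 == k)).map (fun e => e.2))).contains k = true) :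
    ∀ (fuel : Nat) (path : List Int) (c : Int) (seen : PySem.Set Int),
      List.IsChain (fun a b => (b, a) ∈ pvEdges graph) path →
      path.Nodup → path.head? = some node_key → path.getLast? = some c →
      (∀ x : Int, x ∈ seen ↔ x ∈ path) →
      pvLoopA graph fuel path (pvGetFather c graph)
        = pvClimbB (pvFirstParent graph) fuel path seen c := by
  intro fuel
  induction fuel with
  | zero => intro path c seen _ _ _ _ _; rfl
  | succ m ih =>
    intro path c seen hch hnd hhd hlast hseen
    rcases hF : pvGetFather c graph with _ | ⟨p, rest⟩
    · simp only [pvLoopA, pvClimbB, firstParent_get?, hF]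
      rfl
    · have hpc : (p, c) ∈ pvEdges graph :=
        (mem_getFather p c graph).mp (by rw [hF]; exact List.mem_cons_self ..)
      have hnp : p ∉ path := no_revisit node_key graph hPre3 path c p hch hnd hhd hlast hpc
      have hcontains : path.contains p = false := by simpa using hnp
      have hseenp : PySem.Set.contains seen p = false := by
        have : p ∉ seen := fun hmem => hnp ((hseen p).mp hmem)
        simpa [PySem.Set.contains] using this
      have hfilter : List.filter (fun n => !path.contains n) (p :: rest)
          = p :: List.filter (fun n => !path.contains n) rest :=
        List.filter_cons_of_pos (by rw [hcontains]; rfl)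
      have hstepA : pvLoopA graph (m + 1) path (p :: rest)
          = pvLoopA graph m (path ++ [p]) (pvGetFather p graph) := by
        simp only [pvLoopA]
        rw [if_neg (by simp), hfilter]
        rfl
      have hstepB : pvClimbB (pvFirstParent graph) (m + 1) path seen c
          = pvClimbB (pvFirstParent graph) m (path ++ [p]) (PySem.Set.add seen p) p := by
        simp only [pvClimbB, firstParent_get?, hF, List.head?_cons]
        rw [hseenp]
        rfl
      rw [hstepA, hstepB]
      have hne : path ≠ [] := by
        intro h; rw [h] at hlast; simp at hlast
      refine ih (path ++ [p]) p (PySem.Set.add seen p) ?_ ?_ ?_ ?_ ?_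
      · rw [List.isChain_append]
        refine ⟨hch, List.IsChain.singleton p, ?_⟩
        intro x hx y hy
        rw [hlast] at hx
        simp only [List.head?_cons, Option.mem_def, Option.some.injEq] at hx hy
        subst hx; subst hy
        exact hpc
      · simp only [List.nodup_append, List.nodup_singleton, true_and, hnd]
        intro a ha b hb
        rw [List.mem_singleton] at hb
        subst hb
        exact fun h => hnp (h ▸ ha)
      · rw [List.head?_append, hhd]; rfl
      · exact List.getLast?_concat
      · intro x
        rw [PySem.Set.mem_add]
        simp [hseen x]

-- ===== VERDICT (by name: the statement is the Claim_ definition above) =====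
theorem path_to_node_spec : Claim_equal_path_to_node := by
  intro node_key graph _ hPre
  show path_to_node node_key graph = path_to_node_alt node_key graph
  obtain ⟨_, _, hPre3⟩ := hPre
  have := loop_eq node_key graph hPre3 (graph.length + 1) [node_key] node_key
    (PySem.Set.ofList [node_key]) (List.IsChain.singleton node_key) (by simp) rfl rfl
    (fun x => by simp [PySem.Set.mem_ofList])
  exact this
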